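-- pv_equiv track=rewrite | github.com/deejayessel/virtual-multi-counting | algo.py | filterPerms
-- ===== SOURCE A (Python) =====
-- def strColoring(coloring):
--     return "".join([str(v) for (k,v) in coloring.items()])
--
-- def strList(cs):
--     xs = [strColoring(c) for c in cs]
--     ys = [(x.count('C'),x) for x in xs]
--     return [b for a,b in sorted(ys)]
--
-- def isPerm(a, b):
--     """ Checks if a is a permutation of b """
--     return a in b+b
--
-- def filterPerms(cs):
--     def inserted(l, x):
--         for elt in l:
--             if isPerm(elt, x):
--                 return l
--         return l+[x]
--
--     xs = strList(cs)
--     l = []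
--     for x in xs:
--         l = inserted(l, x)
--     return l
-- ===== SOURCE B (Python) =====
-- def filterPerms(cs):
--     xs = sorted(("".join(c.values()) for c in cs), key=lambda s: (s.count('C'), s))
--     out = []
--     while xs:
--         h = xs[0]
--         out.append(h)
--         xs = [y for y in xs[1:] if h not in y + y]
--     return out
-- ===== Notes on version B (the rewrite author's own statement) =====
-- stated objective: alternative
-- what changed: B sorts the joined strings directly with a (count('C'), s) key instead of decorate-sort-undecorate on tuples, and dedups with a sieve (keep the head, filter all later strings it blocks, recurse) instead of A's per-candidate rescan of the kept list.
import Mathlib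
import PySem

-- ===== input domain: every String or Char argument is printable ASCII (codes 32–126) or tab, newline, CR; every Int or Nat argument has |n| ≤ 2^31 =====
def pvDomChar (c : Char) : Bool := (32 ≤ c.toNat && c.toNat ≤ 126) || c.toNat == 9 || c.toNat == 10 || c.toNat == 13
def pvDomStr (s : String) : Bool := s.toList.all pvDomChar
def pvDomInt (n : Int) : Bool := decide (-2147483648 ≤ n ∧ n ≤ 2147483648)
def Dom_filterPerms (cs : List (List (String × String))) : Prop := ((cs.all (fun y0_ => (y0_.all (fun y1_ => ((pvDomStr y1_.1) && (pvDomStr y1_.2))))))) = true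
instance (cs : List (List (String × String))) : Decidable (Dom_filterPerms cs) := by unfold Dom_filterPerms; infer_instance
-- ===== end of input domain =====

-- B replaces A's per-candidate scan of the kept list by a sieve (keep the head, filter the
-- remainder, recurse) and sorts the strings directly with a key instead of decorating them with
-- tuples; same cost, different structure (objective: alternative).

-- ===== PORT A =====
-- "".join([str(v) for (k,v) in coloring.items()])  (str(v) on a str is v itself)
def strColoring (c : List (String × String)) : String :=
  PySem.Str.join "" (((PySem.Dict.ofList c).items).map (fun kv => kv.2))

-- sorted(ys) on (int, str) tuples = sorted2 with the two projections as keys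
def strList (cs : List (List (String × String))) : List String :=
  let xs := cs.map strColoring
  let ys := xs.map (fun x => (PySem.Str.count x "C", x))
  (PySem.List.sorted2 ys (fun p => p.1) (fun p => p.2) false).map (fun p => p.2)

-- a in b+b  (Python str concatenation = List Char append, exact via PySem.Chars.isIn)
def isPerm (a b : String) : Bool :=
  PySem.Chars.isIn a.toList (b.toList ++ b.toList)

-- the 'for elt in l: …' loop of inserted, scanning l
def insertedAux (l : List String) (x : String) : List String → List String
  | [] => l ++ [x]
  | e :: r => if isPerm e x then l else insertedAux l x r

def inserted (l : List String) (x : String) : List String := insertedAux l x l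

def filterPerms (cs : List (List (String × String))) : List String :=
  (strList cs).foldl inserted []

-- ===== PORT B =====
-- the while-loop of Source B: keep the head, filter it out of the rest, continue
def altSieve : List String → List String
  | [] => []
  | h :: t =>
      h :: altSieve (t.filter (fun y => !(PySem.Chars.isIn h.toList (y.toList ++ y.toList))))
  termination_by l => l.length
  decreasing_by simpa using List.length_filter_le _ t.attach

def filterPerms_alt (cs : List (List (String × String))) : List String :=
  altSieve (PySem.List.sorted2
    (cs.map (fun c => PySem.Str.join "" ((PySem.Dict.ofList c).values)))
    (fun s => PySem.Str.count s "C") (fun s => s) false)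

-- ===== PRECONDITION & SPEC =====
def Spec_filterPerms (cs : List (List (String × String))) (out : List String) : Prop := out = filterPerms_alt cs
instance (cs : List (List (String × String))) (out : List String) : Decidable (Spec_filterPerms cs out) := by unfold Spec_filterPerms; infer_instance

-- ===== CLAIM (what is proved, stated in full; the proofs are below) =====
def Claim_equal_filterPerms : Prop := ∀ (cs : List (List (String × String))), Dom_filterPerms cs → Spec_filterPerms cs (filterPerms cs)

-- ===== LEMMAS AND PROOFS =====

-- inserted scans r and returns l unchanged iff some element of r blocks x
theorem insertedAux_eq (l : List String) (x : String) (r : List String) :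
    insertedAux l x r = if r.any (fun e => isPerm e x) then l else l ++ [x] := by
  induction r with
  | nil => simp [insertedAux]
  | cons e r ih =>
      by_cases h : isPerm e x <;> simp [insertedAux, h, ih]

theorem inserted_eq (l : List String) (x : String) :
    inserted l x = if l.any (fun e => isPerm e x) then l else l ++ [x] :=
  insertedAux_eq l x l

-- the suffix A's fold appends after the already-kept list l
def gSieve (l : List String) : List String → List String
  | [] => []
  | x :: t => if l.any (fun e => isPerm e x) then gSieve l t else x :: gSieve (l ++ [x]) t

theorem foldl_inserted_eq (xs l : List String) :
    xs.foldl inserted l = l ++ gSieve l xs := by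
  induction xs generalizing l with
  | nil => simp [gSieve]
  | cons x t ih =>
      simp only [List.foldl_cons, inserted_eq, gSieve]
      by_cases h : l.any (fun e => isPerm e x)
      · simp [h, ih]
      · simp [h, ih (l ++ [x]), List.append_assoc]

-- gSieve reads the kept list only through blocking tests, so any two kept lists
-- that block the same strings give the same result
theorem gSieve_congr (t : List String) : ∀ l1 l2 : List String,
    (∀ y, l1.any (fun e => isPerm e y) = l2.any (fun e => isPerm e y)) →
    gSieve l1 t = gSieve l2 t := by
  induction t with
  | nil => intro l1 l2 _; rfl
  | cons x r ih =>
      intro l1 l2 h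
      simp only [gSieve, h x]
      by_cases hb : l2.any (fun e => isPerm e x)
      · simp [hb, ih l1 l2 h]
      · simp only [hb, Bool.false_eq_true, if_false]
        congr 1
        exact ih (l1 ++ [x]) (l2 ++ [x]) (fun y => by simp [List.any_append, h y])

-- extending the kept list by x is the same as filtering x's followers out in advance
theorem gSieve_append (t : List String) : ∀ (l : List String) (x : String),
    gSieve (l ++ [x]) t = gSieve l (t.filter (fun y => !isPerm x y)) := by
  induction t with
  | nil => intro l x; rfl
  | cons y r ih =>
      intro l x
      by_cases hxy : isPerm x y
      · have hb : ((l ++ [x]).any fun e => isPerm e y) = true := by simp [hxy]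
        simp [gSieve, hb, hxy, ih]
      · by_cases hly : (l.any fun e => isPerm e y)
        · have hb : ((l ++ [x]).any fun e => isPerm e y) = true := by simp [hly]
          simp [gSieve, hb, hxy, hly, ih]
        · have hb : ((l ++ [x]).any fun e => isPerm e y) = false := by
            simp [List.any_append, hly, hxy]
          have hfil : (y :: r).filter (fun y => !isPerm x y)
              = y :: r.filter (fun y => !isPerm x y) := by simp [hxy]
          rw [hfil]
          simp only [gSieve, hb, hly, Bool.false_eq_true, if_false]
          congr 1
          have hswap : gSieve ((l ++ [x]) ++ [y]) r = gSieve ((l ++ [y]) ++ [x]) r :=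
            gSieve_congr r _ _ (fun z => by
              simp [List.any_append, Bool.or_assoc, Bool.or_comm])
          rw [hswap, ih (l ++ [y]) x]

-- B's sieve computes exactly that suffix, starting from no kept strings
theorem altSieve_eq_gSieve (xs : List String) : altSieve xs = gSieve [] xs := by
  have main : ∀ n (xs : List String), xs.length ≤ n → altSieve xs = gSieve [] xs := by
    intro n
    induction n with
    | zero =>
        intro xs h
        have : xs = [] := List.eq_nil_of_length_eq_zero (Nat.le_zero.mp h)
        subst this; simp [altSieve, gSieve]
    | succ n ih =>
        intro xs h
        cases xs with
        | nil => simp [altSieve, gSieve]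
        | cons x t =>
            have hlen : (t.filter (fun y =>
                !(PySem.Chars.isIn x.toList (y.toList ++ y.toList)))).length ≤ n :=
              le_trans (List.length_filter_le _ _) (Nat.le_of_succ_le_succ h)
            rw [altSieve, ih _ hlen]
            have h2 : gSieve ([] ++ [x]) t
                = gSieve [] (t.filter (fun y => !isPerm x y)) := gSieve_append t [] x
            simp only [gSieve, List.any_nil, Bool.false_eq_true, if_false]
            show x :: gSieve [] (t.filter (fun y => !isPerm x y)) = x :: gSieve ([] ++ [x]) t
            rw [h2]
  exact main xs.length xs le_rfl

-- insertBy commutes with a comparison-preserving map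
theorem insertBy_map {α β : Type} (f : α → β) (p : β → β → Bool) (q : α → α → Bool)
    (h : ∀ a b, p (f a) (f b) = q a b) (x : α) (l : List α) :
    PySem.List.insertBy p (f x) (l.map f) = (PySem.List.insertBy q x l).map f := by
  induction l with
  | nil => simp [PySem.List.insertBy]
  | cons y r ih =>
      simp only [List.map_cons, PySem.List.insertBy, h]
      by_cases hq : q x y <;> simp [hq, ih]

theorem foldl_insertBy_map {α β : Type} (f : α → β) (p : β → β → Bool) (q : α → α → Bool)
    (h : ∀ a b, p (f a) (f b) = q a b) (xs : List α) : ∀ l : List α,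
    xs.foldl (fun acc x => PySem.List.insertBy p (f x) acc) (l.map f)
      = (xs.foldl (fun acc x => PySem.List.insertBy q x acc) l).map f := by
  induction xs with
  | nil => intro l; rfl
  | cons x t ih =>
      intro l
      simp only [List.foldl_cons]
      rw [insertBy_map f p q h, ih]

-- A's decorate-sort-undecorate equals B's keyed sort of the bare strings
theorem strList_eq_alt (cs : List (List (String × String))) :
    strList cs = PySem.List.sorted2 (cs.map strColoring)
      (fun s => PySem.Str.count s "C") (fun s => s) false := by
  unfold strList PySem.List.sorted2
  simp only [Bool.false_eq_true, if_false]
  set xs := cs.map strColoring with hxs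
  rw [List.foldl_map]
  have h := foldl_insertBy_map (fun x => (PySem.Str.count x "C", x))
    (fun a b => decide (a.1 < b.1) || (!decide (b.1 < a.1) && decide (a.2 < b.2)))
    (fun a b => decide (PySem.Str.count a "C" < PySem.Str.count b "C")
      || (!decide (PySem.Str.count b "C" < PySem.Str.count a "C") && decide (a < b)))
    (fun a b => rfl) xs []
  simp only [List.map_nil] at h
  rw [h, List.map_map]
  simp [Function.comp_def]

-- ===== VERDICT (by name: the statement is the Claim_ definition above) =====
theorem filterPerms_spec : Claim_equal_filterPerms := by
  intro cs _
  show filterPerms cs = filterPerms_alt cs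
  unfold filterPerms filterPerms_alt
  rw [foldl_inserted_eq, List.nil_append, ← altSieve_eq_gSieve, strList_eq_alt]
  rfl
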